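-- pv_equiv track=rewrite | github.com/lonely-wolf-howl/coding-test | baekjoon/1269.py | process
-- ===== SOURCE A (Python) =====
-- def process(a_list, b_list):
--     a_list.sort()  # time complexity: n log n
--     b_list.sort()
--
--     i = j = 0
--     count = 0
--
--     while i < len(a_list) and j < len(b_list):
--         if a_list[i] < b_list[j]:
--             count += 1
--             i += 1
--         elif a_list[i] > b_list[j]:
--             count += 1
--             j += 1
--         else:
--             i += 1
--             j += 1
--
--     count += (len(a_list) - i) + (len(b_list) - j)
--
--     return count
-- ===== SOURCE B (Python) =====
-- def process(a_list, b_list):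
--     ca = {}
--     for x in a_list:
--         ca[x] = ca.get(x, 0) + 1
--     cb = {}
--     for x in b_list:
--         cb[x] = cb.get(x, 0) + 1
--     total = 0
--     for k, v in ca.items():
--         total += abs(v - cb.get(k, 0))
--     for k, v in cb.items():
--         if k not in ca:
--             total += v
--     return total
-- ===== Notes on version B (the rewrite author's own statement) =====
-- stated objective: faster
-- what changed: Replaces sort-both-lists-then-two-pointer-merge by hash-based frequency counting: build a count dict per list in one pass each and sum |count_a(k) - count_b(k)| over the keys, with no sorting and no mutation of the inputs.
import Mathlib
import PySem

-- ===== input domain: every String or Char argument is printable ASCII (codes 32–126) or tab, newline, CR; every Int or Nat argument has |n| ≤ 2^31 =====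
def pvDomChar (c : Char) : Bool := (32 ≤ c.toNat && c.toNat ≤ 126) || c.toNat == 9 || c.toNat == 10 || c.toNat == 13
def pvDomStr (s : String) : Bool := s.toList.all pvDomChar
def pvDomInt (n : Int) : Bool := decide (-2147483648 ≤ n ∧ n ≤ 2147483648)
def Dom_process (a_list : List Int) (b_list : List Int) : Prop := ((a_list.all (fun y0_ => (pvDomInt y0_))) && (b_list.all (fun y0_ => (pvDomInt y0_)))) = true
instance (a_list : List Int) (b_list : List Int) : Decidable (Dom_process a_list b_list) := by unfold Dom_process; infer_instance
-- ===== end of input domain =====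

-- B replaces A's sort-both-then-merge scan by two frequency dictionaries tallied in one
-- pass each (no sorting); equivalence is about the RETURN value only — A sorts its two
-- argument lists in place, B does not mutate them.

-- ===== PORT A =====
-- The while loop over indices i, j into the two sorted lists, with accumulator `count`;
-- the suffix lengths added after the loop are folded into the base cases.
def mergeCountA : List Int → List Int → Int → Int
  | x :: xs, y :: ys, c =>
    if x < y then mergeCountA xs (y :: ys) (c + 1)
    else if x > y then mergeCountA (x :: xs) ys (c + 1)
    else mergeCountA xs ys c
  | xs, ys, c => c + (xs.length : Int) + (ys.length : Int)

def process (a_list : List Int) (b_list : List Int) : Int :=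
  mergeCountA (PySem.List.sorted a_list (fun x => x) false)
              (PySem.List.sorted b_list (fun x => x) false) 0

-- ===== PORT B =====
def process_alt (a_list : List Int) (b_list : List Int) : Int :=
  let ca := a_list.foldl (fun d x => d.insert x (d.getD x 0 + 1)) PySem.Dict.empty
  let cb := b_list.foldl (fun d x => d.insert x (d.getD x 0 + 1)) PySem.Dict.empty
  let t1 := ca.items.foldl (fun t kv => t + |kv.2 - cb.getD kv.1 0|) 0
  cb.items.foldl (fun t kv => if ca.contains kv.1 then t else t + kv.2) t1

-- ===== PRECONDITION & SPEC =====
def Spec_process (a_list : List Int) (b_list : List Int) (out : Int) : Prop := out = process_alt a_list b_list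
instance (a_list : List Int) (b_list : List Int) (out : Int) : Decidable (Spec_process a_list b_list out) := by unfold Spec_process; infer_instance

-- ===== CLAIM (what is proved, stated in full; the proofs are below) =====
def Claim_equal_process : Prop := ∀ (a_list : List Int) (b_list : List Int), Dom_process a_list b_list → Spec_process a_list b_list (process a_list b_list)

-- ===== LEMMAS AND PROOFS =====

-- the common value: the size of the multiset symmetric difference
def sdc (a b : List Int) : Nat :=
  ((a : Multiset Int) - (b : Multiset Int)).card + ((b : Multiset Int) - (a : Multiset Int)).card

theorem cons_sub_of_notMem {x : Int} {s t : Multiset Int} (h : x ∉ t) :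
    (x ::ₘ s) - t = x ::ₘ (s - t) := by
  ext v
  simp only [Multiset.count_sub, Multiset.count_cons]
  by_cases hv : v = x
  · subst hv
    have : Multiset.count v t = 0 := Multiset.count_eq_zero.mpr h
    omega
  · simp [hv]

theorem sub_cons_of_notMem {x : Int} {s t : Multiset Int} (h : x ∉ t) :
    t - (x ::ₘ s) = t - s := by
  rw [Multiset.sub_cons, Multiset.erase_of_notMem h]

theorem coe_cons_int (x : Int) (l : List Int) :
    ((x :: l : List Int) : Multiset Int) = x ::ₘ (l : Multiset Int) :=
  (Multiset.cons_coe x l).symm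

theorem sdc_nil_left (ys : List Int) : sdc [] ys = ys.length := by
  simp [sdc]

theorem sdc_nil_right (xs : List Int) : sdc xs [] = xs.length := by
  simp [sdc]

theorem mergeCountA_eq (xs : List Int) :
    ∀ (ys : List Int) (c : Int), xs.Pairwise (· ≤ ·) → ys.Pairwise (· ≤ ·) →
      mergeCountA xs ys c = c + (sdc xs ys : Int) := by
  induction xs with
  | nil =>
    intro ys c _ _
    cases ys with
    | nil => simp [mergeCountA, sdc_nil_left]
    | cons y ys => simp [mergeCountA, sdc_nil_left]; try ring
  | cons x xs ihx =>
    intro ys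
    induction ys with
    | nil => intro c _ _; simp [mergeCountA, sdc_nil_right]; try ring
    | cons y ys ihy =>
      intro c hx hy
      have hx' := (List.pairwise_cons.mp hx).2
      have hy' := (List.pairwise_cons.mp hy).2
      by_cases hlt : x < y
      · have hnot : x ∉ (y :: ys : List Int) := by
          intro hmem
          rcases List.mem_cons.mp hmem with h | h
          · omega
          · have := (List.pairwise_cons.mp hy).1 x h; omega
        have hsdc : sdc (x :: xs) (y :: ys) = sdc xs (y :: ys) + 1 := by
          unfold sdc
          have h1 : ((x :: xs : List Int) : Multiset Int) - (y :: ys : List Int) =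
              x ::ₘ (((xs : List Int) : Multiset Int) - (y :: ys : List Int)) := by
            rw [coe_cons_int x xs]
            exact cons_sub_of_notMem (fun hm => hnot (Multiset.mem_coe.mp hm))
          have h2 : ((y :: ys : List Int) : Multiset Int) - ((x :: xs : List Int) : Multiset Int) =
              ((y :: ys : List Int) : Multiset Int) - ((xs : List Int) : Multiset Int) := by
            rw [coe_cons_int x xs]
            exact sub_cons_of_notMem (fun hm => hnot (Multiset.mem_coe.mp hm))
          rw [h1, h2, Multiset.card_cons]
          ring
        rw [mergeCountA, if_pos hlt, ihx (y :: ys) (c + 1) hx' hy, hsdc]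
        push_cast; ring
      · by_cases hgt : x > y
        · have hnot : y ∉ (x :: xs : List Int) := by
            intro hmem
            rcases List.mem_cons.mp hmem with h | h
            · omega
            · have := (List.pairwise_cons.mp hx).1 y h; omega
          have hsdc : sdc (x :: xs) (y :: ys) = sdc (x :: xs) ys + 1 := by
            unfold sdc
            have h1 : ((y :: ys : List Int) : Multiset Int) - (x :: xs : List Int) =
                y ::ₘ (((ys : List Int) : Multiset Int) - (x :: xs : List Int)) := by
              rw [coe_cons_int y ys]
              exact cons_sub_of_notMem (fun hm => hnot (Multiset.mem_coe.mp hm))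
            have h2 : ((x :: xs : List Int) : Multiset Int) - ((y :: ys : List Int) : Multiset Int) =
                ((x :: xs : List Int) : Multiset Int) - ((ys : List Int) : Multiset Int) := by
              rw [coe_cons_int y ys]
              exact sub_cons_of_notMem (fun hm => hnot (Multiset.mem_coe.mp hm))
            rw [h1, h2, Multiset.card_cons]
            ring
          rw [mergeCountA, if_neg hlt, if_pos hgt, ihy (c + 1) hx hy', hsdc]
          push_cast; ring
        · have hxy : x = y := by omega
          subst hxy
          have hsdc : sdc (x :: xs) (x :: ys) = sdc xs ys := by
            unfold sdc
            have h1 : ∀ (s t : List Int),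
                ((x :: s : List Int) : Multiset Int) - ((x :: t : List Int) : Multiset Int) =
                ((s : List Int) : Multiset Int) - ((t : List Int) : Multiset Int) := by
              intro s t
              rw [← Multiset.cons_coe, ← Multiset.cons_coe, Multiset.sub_cons,
                Multiset.erase_cons_head]
            rw [h1, h1]
          rw [mergeCountA, if_neg hlt, if_neg hgt, ihx ys c hx' hy', hsdc]

theorem process_eq_sdc (a b : List Int) : process a b = (sdc a b : Int) := by
  unfold process
  rw [mergeCountA_eq _ _ _ (PySem.List.sorted_pairwise a (fun x => x))
      (PySem.List.sorted_pairwise b (fun x => x))]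
  have ha : ((PySem.List.sorted a (fun x => x) false : List Int) : Multiset Int) = (a : Multiset Int) :=
    Multiset.coe_eq_coe.mpr (PySem.List.sorted_perm a (fun x => x) false)
  have hb : ((PySem.List.sorted b (fun x => x) false : List Int) : Multiset Int) = (b : Multiset Int) :=
    Multiset.coe_eq_coe.mpr (PySem.List.sorted_perm b (fun x => x) false)
  unfold sdc
  rw [ha, hb]
  ring

theorem toFinset_ofList (xs : List Int) : (PySem.Set.ofList xs).toFinset = xs.toFinset := by
  ext v; simp [PySem.Set.mem_ofList]

theorem card_eq_sum_over (s : Multiset Int) (U : Finset Int) (h : s.toFinset ⊆ U) :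
    s.card = ∑ x ∈ U, s.count x := by
  rw [← Multiset.toFinset_sum_count_eq]
  exact Finset.sum_subset h (fun x _ hx => Multiset.count_eq_zero.mpr
    (fun hm => hx (Multiset.mem_toFinset.mpr hm)))

theorem abs_cast_sub (m n : Nat) : |(m : Int) - (n : Int)| = ((m - n) + (n - m) : Nat) := by
  rcases le_total m n with h | h
  · rw [abs_of_nonpos (by omega)]
    omega
  · rw [abs_of_nonneg (by omega)]
    omega

theorem sum_eq_sdc (a b : List Int) :
    ((PySem.Set.ofList a).map (fun k => |(List.count k a : Int) - (List.count k b : Int)|)).sum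
    + ((PySem.Set.ofList b).map (fun k => if a.contains k then (0 : Int) else (List.count k b : Int))).sum
    = (sdc a b : Int) := by
  classical
  set A := a.toFinset with hA
  set B := b.toFinset with hB
  set U := A ∪ B with hU
  -- list sums → Finset sums
  rw [← List.sum_toFinset _ (PySem.Set.nodup_ofList a),
      ← List.sum_toFinset _ (PySem.Set.nodup_ofList b),
      toFinset_ofList, toFinset_ofList]
  -- the RHS as a sum over U
  have hsub1 : ((a : Multiset Int) - (b : Multiset Int)).toFinset ⊆ U := by
    intro x hx
    have : x ∈ (a : Multiset Int) - (b : Multiset Int) := Multiset.mem_toFinset.mp hx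
    have : x ∈ (a : Multiset Int) := Multiset.mem_of_le (Multiset.sub_le_self _ _) this
    exact Finset.mem_union_left _ (by simpa [hA] using this)
  have hsub2 : ((b : Multiset Int) - (a : Multiset Int)).toFinset ⊆ U := by
    intro x hx
    have : x ∈ (b : Multiset Int) - (a : Multiset Int) := Multiset.mem_toFinset.mp hx
    have : x ∈ (b : Multiset Int) := Multiset.mem_of_le (Multiset.sub_le_self _ _) this
    exact Finset.mem_union_right _ (by simpa [hB] using this)
  have hrhs : sdc a b = ∑ x ∈ U, ((List.count x a - List.count x b) + (List.count x b - List.count x a)) := by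
    unfold sdc
    rw [card_eq_sum_over _ U hsub1, card_eq_sum_over _ U hsub2, ← Finset.sum_add_distrib]
    refine Finset.sum_congr rfl (fun x _ => ?_)
    rw [Multiset.count_sub, Multiset.count_sub]
    simp [Multiset.coe_count]
  rw [hrhs]
  push_cast
  -- split U into A and B \ A
  have hsplit : U = A ∪ (B \ A) := by rw [hU, Finset.union_sdiff_self_eq_union]
  rw [hsplit, Finset.sum_union Finset.disjoint_sdiff]
  -- the second list sum equals the sum over B \ A
  have hsd : B \ A = B.filter (fun x => ¬ x ∈ a) := by
    rw [Finset.sdiff_eq_filter]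
    refine Finset.filter_congr (fun x _ => ?_)
    simp [hA]
  have hb2 : ∑ x ∈ B, (if a.contains x then (0 : Int) else (List.count x b : Int))
      = ∑ x ∈ B \ A, (List.count x b : Int) := by
    rw [hsd, Finset.sum_filter]
    refine Finset.sum_congr rfl (fun x _ => ?_)
    by_cases hm : x ∈ a
    · simp [hm]
    · simp [hm]
  rw [hb2]
  congr 1
  · refine Finset.sum_congr rfl (fun x _ => ?_)
    rw [abs_cast_sub]
    push_cast
    ring
  · refine Finset.sum_congr rfl (fun x hx => ?_)
    have hxa : x ∉ a := by
      have := (Finset.mem_sdiff.mp hx).2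
      simpa [hA] using this
    have : List.count x a = 0 := List.count_eq_zero.mpr hxa
    rw [this]
    omega

theorem process_alt_eq_sdc (a b : List Int) : process_alt a b = (sdc a b : Int) := by
  unfold process_alt
  rw [PySem.Dict.foldl_insert_getD_add_one_eq_counter,
      PySem.Dict.foldl_insert_getD_add_one_eq_counter,
      PySem.List.foldl_congr_mem _
        (fun t kv => if (PySem.Dict.counter a).contains kv.1 then t else t + kv.2)
        (fun (t : Int) (kv : Int × Int) => t + (if a.contains kv.1 then (0 : Int) else kv.2)) _
        (by
          intro acc kv _
          by_cases h : kv.1 ∈ a <;>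
            simp [PySem.Dict.contains_counter, h]),
      PySem.List.foldl_add, PySem.List.foldl_add]
  simp only [PySem.Dict.items_counter, List.map_map, PySem.Dict.getD_counter]
  simpa using sum_eq_sdc a b

-- ===== VERDICT (by name: the statement is the Claim_ definition above) =====
theorem process_spec : Claim_equal_process := by
  intro a b _
  unfold Spec_process
  rw [process_eq_sdc, process_alt_eq_sdc]
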